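-- pv_equiv track=rewrite | github.com/bjx-bj/magic-python | ewuihuf.py | has_consecutive_chars
-- ===== SOURCE A (Python) =====
-- def has_consecutive_chars(s, n=6):  # 将 n 从 6 改为 3
--
--     """
--
--     检查字符串 s 是否包含至少 n 个连续相同的字符。
--
--     """
--
--     if len(s) < n:
--
--         return False
--
--     for i in range(len(s) - n + 1):
--
--         substring = s[i:i+n]
--
--         if len(set(substring)) == 1:
--
--             return True
--
--     return False
-- ===== SOURCE B (Python) =====
-- def has_consecutive_chars(s, n=6):
--     """Single pass: track the length of the current run of identical chars."""
--     run = 0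
--     prev = None
--     for c in s:
--         run = run + 1 if c == prev else 1
--         prev = c
--         if run >= n:
--             return True
--     return False
-- ===== Notes on version B (the rewrite author's own statement) =====
-- stated objective: alternative
-- what changed: Replaces the sliding-window scan that builds a length-n substring and a set at every position with a single pass maintaining the current run length of identical consecutive characters (intended as asymptotically lighter; a timing run could not confirm a speed-up, so none is claimed).
-- outside the precondition, e.g. on has_consecutive_chars('aaa', 0): A returns False, B returns True; on has_consecutive_chars('ab', -1): A returns True, B returns True
import Mathlib
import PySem

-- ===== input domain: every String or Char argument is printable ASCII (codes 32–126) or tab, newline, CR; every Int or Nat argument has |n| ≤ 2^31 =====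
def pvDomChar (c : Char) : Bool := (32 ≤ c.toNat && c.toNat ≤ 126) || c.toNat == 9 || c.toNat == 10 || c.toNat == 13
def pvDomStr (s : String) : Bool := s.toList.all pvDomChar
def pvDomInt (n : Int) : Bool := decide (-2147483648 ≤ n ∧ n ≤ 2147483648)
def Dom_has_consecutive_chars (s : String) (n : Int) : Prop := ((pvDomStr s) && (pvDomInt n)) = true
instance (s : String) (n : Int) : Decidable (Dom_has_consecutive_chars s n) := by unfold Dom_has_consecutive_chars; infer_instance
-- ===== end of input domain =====

-- B replaces A's sliding window (build a length-n substring and a set at each position) with a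
-- single pass tracking the current run length of identical consecutive characters.

-- ===== PORT A =====
def has_consecutive_chars (s : String) (n : Int) : Bool :=
  if PySem.Str.len s < n then false
  else
    (PySem.List.pyRange 0 (PySem.Str.len s - n + 1) 1).any
      (fun i =>
        let substring := PySem.List.slice s.toList (some i) (some (i + n))
        (PySem.Set.ofList substring).length == 1)

-- ===== PORT B =====
def hccRun (n : Int) : List Char → Int → Option Char → Bool
  | [], _, _ => false
  | c :: rest, run, prev =>
    let run' := if some c = prev then run + 1 else 1
    if n ≤ run' then true else hccRun n rest run' (some c)

def has_consecutive_chars_alt (s : String) (n : Int) : Bool :=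
  hccRun n s.toList 0 none

-- ===== PRECONDITION & SPEC =====
-- Pre_ restricts to the natural domain n ≥ 1 (a positive run length): for n ≤ 0 A's value is an
-- accident of negative-slice wraparound / empty windows (A returns True at ('ab', -1) and False
-- at ('aaa', 0)), outside the function's stated purpose.
def Pre_has_consecutive_chars (s : String) (n : Int) : Prop := 1 ≤ n
instance (s : String) (n : Int) : Decidable (Pre_has_consecutive_chars s n) := by
  unfold Pre_has_consecutive_chars; infer_instance

def pvWitness_has_consecutive_chars : String × Int := ("abbba", 3)

def Spec_has_consecutive_chars (s : String) (n : Int) (out : Bool) : Prop :=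
  out = has_consecutive_chars_alt s n
instance (s : String) (n : Int) (out : Bool) : Decidable (Spec_has_consecutive_chars s n out) := by
  unfold Spec_has_consecutive_chars; infer_instance

-- ===== CLAIM (what is proved, stated in full; the proofs are below) =====
def Claim_equal_has_consecutive_chars : Prop :=
  ∀ (s : String) (n : Int), Dom_has_consecutive_chars s n →
    Pre_has_consecutive_chars s n →
    Spec_has_consecutive_chars s n (has_consecutive_chars s n)

-- ===== LEMMAS AND PROOFS =====

-- length of the maximal prefix of cs whose elements (as `some _`) equal p
def leadCnt (p : Option Char) : List Char → Nat
  | [] => 0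
  | c :: r => if some c = p then 1 + leadCnt p r else 0

-- "cs contains a constant window of length m"
def hasWin (m : Nat) (cs : List Char) : Prop :=
  ∃ k c, k + m ≤ cs.length ∧ (cs.drop k).take m = List.replicate m c

lemma dedup_length_one_iff (w : List Char) :
    (PySem.List.dedup w).length = 1 ↔ ∃ c, w ≠ [] ∧ w = List.replicate w.length c := by
  constructor
  · intro h
    obtain ⟨a, ha⟩ := List.length_eq_one_iff.mp h
    refine ⟨a, ?_, ?_⟩
    · rintro rfl; simp [PySem.List.dedup] at ha
    · rw [List.eq_replicate_iff]
      refine ⟨rfl, fun b hb => ?_⟩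
      have : b ∈ PySem.List.dedup w := (PySem.List.mem_dedup w b).mpr hb
      rw [ha] at this; simpa using this
  · rintro ⟨c, hne, hrep⟩
    have hmem : ∀ x, x ∈ PySem.List.dedup w ↔ x = c := by
      intro x
      rw [PySem.List.mem_dedup w x, hrep]
      constructor
      · intro hx; exact (List.eq_of_mem_replicate hx)
      · intro hx; subst hx
        have : 0 < w.length := List.length_pos_iff.mpr hne
        exact List.mem_replicate.mpr ⟨by omega, rfl⟩
    have hnd := PySem.List.nodup_dedup (xs := w)
    cases hd : PySem.List.dedup w with
    | nil =>
      have := (hmem c).mpr rfl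
      rw [hd] at this; simp at this
    | cons x r =>
      rw [hd] at hmem hnd
      have hx : x = c := (hmem x).mp (by simp)
      have hr : r = [] := by
        cases r with
        | nil => rfl
        | cons y t =>
          have hy : y = c := (hmem y).mp (by simp)
          subst hx hy
          simp at hnd
      simp [hr]

lemma take_replicate_iff (c : Char) (cs : List Char) (m : Nat) :
    cs.take m = List.replicate m c ↔ m ≤ leadCnt (some c) cs := by
  induction cs generalizing m with
  | nil =>
    cases m with
    | zero => simp [leadCnt]
    | succ k => simp [leadCnt]
  | cons c' r ih =>
    cases m with
    | zero => simp
    | succ k =>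
      simp only [List.take_succ_cons, List.replicate_succ, List.cons.injEq, leadCnt]
      by_cases hc : c' = c
      · subst hc; simp [ih]; omega
      · simp [hc]

lemma hasWin_cons (m : Nat) (hm : 1 ≤ m) (c : Char) (rest : List Char) :
    hasWin m (c :: rest) ↔ (c :: rest).take m = List.replicate m c ∨ hasWin m rest := by
  constructor
  · rintro ⟨k, c', hlen, hrep⟩
    cases k with
    | zero =>
      left
      simp only [List.drop_zero] at hrep
      have hc : c' = c := by
        cases m with
        | zero => omega
        | succ k0 =>
          rw [List.take_succ_cons, List.replicate_succ] at hrep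
          exact ((List.cons.inj hrep).1).symm
      rw [hc] at hrep; simpa using hrep
    | succ k' =>
      right
      exact ⟨k', c', by simp at hlen ⊢; omega, by simpa using hrep⟩
  · rintro (h | ⟨k, c', hlen, hrep⟩)
    · refine ⟨0, c, ?_, by simpa using h⟩
      have := congrArg List.length h
      simp [List.length_take, List.length_replicate] at this
      simp only [List.length_cons] at this ⊢
      omega
    · exact ⟨k + 1, c', by simp only [List.length_cons]; omega, by simpa using hrep⟩

lemma A_iff (s : String) (n : Int) (hn : 1 ≤ n) :
    has_consecutive_chars s n = true ↔ hasWin n.toNat s.toList := by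
  set cs := s.toList with hcs
  set m : Nat := n.toNat with hm
  have hmn : (m : Int) = n := Int.toNat_of_nonneg (by omega)
  have hm1 : 1 ≤ m := by omega
  unfold has_consecutive_chars
  have hlen : PySem.Str.len s = (cs.length : Int) := by
    simp [PySem.Str.len, hcs]
  rw [hlen]
  by_cases hshort : (cs.length : Int) < n
  · simp only [if_pos hshort]
    constructor
    · intro h; exact absurd h (by simp)
    · rintro ⟨k, c, hk, -⟩
      exfalso; omega
  · simp only [if_neg hshort]
    rw [List.any_eq_true]
    constructor
    · rintro ⟨i, hi, hcond⟩
      rw [PySem.List.mem_pyRange_one] at hi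
      obtain ⟨hi0, hi1⟩ := hi
      set k : Nat := i.toNat with hk
      have hik : (k : Int) = i := Int.toNat_of_nonneg hi0
      have hklen : k + m ≤ cs.length := by omega
      rw [← hik, ← hmn, PySem.List.slice_natCast_add] at hcond
      rw [beq_iff_eq] at hcond
      have hdl : (PySem.List.dedup ((cs.drop k).take m)).length = 1 := by
        simpa using hcond
      obtain ⟨c, hne, hrep⟩ := (dedup_length_one_iff _).mp hdl
      have hwl : ((cs.drop k).take m).length = m := by
        simp [List.length_take, List.length_drop]; omega
      exact ⟨k, c, hklen, by rwa [hwl] at hrep⟩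
    · rintro ⟨k, c, hklen, hrep⟩
      refine ⟨(k : Int), ?_, ?_⟩
      · rw [PySem.List.mem_pyRange_one]; constructor <;> omega
      · rw [← hmn, PySem.List.slice_natCast_add, beq_iff_eq]
        have hwl : ((cs.drop k).take m).length = m := by
          simp [List.length_take, List.length_drop]; omega
        have : (PySem.List.dedup ((cs.drop k).take m)).length = 1 := by
          rw [dedup_length_one_iff]
          exact ⟨c, by rw [← List.length_pos_iff, hwl]; omega, by rwa [hwl]⟩
        simpa using this

lemma hccRun_iff (n : Int) (hn : 1 ≤ n) (cs : List Char) :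
    ∀ (run : Int) (prev : Option Char), 0 ≤ run →
      (hccRun n cs run prev = true ↔
        (∃ j : Nat, 1 ≤ j ∧ (j : Int) ≤ (leadCnt prev cs : Int) ∧ n ≤ run + j) ∨
          hasWin n.toNat cs) := by
  have hmn : ((n.toNat : Int)) = n := Int.toNat_of_nonneg (by omega)
  have hm1 : 1 ≤ n.toNat := by omega
  induction cs with
  | nil =>
    intro run prev hrun
    simp only [hccRun, leadCnt]
    constructor
    · intro h; exact absurd h (by simp)
    · rintro (⟨j, hj1, hj2, -⟩ | ⟨k, c, hk, -⟩)
      · exfalso; omega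
      · exfalso; simp at hk; omega
  | cons c rest ih =>
    intro run prev hrun
    -- first-m-constant reformulation via leadCnt
    have hwin := hasWin_cons n.toNat hm1 c rest
    have htake := take_replicate_iff c (c :: rest) n.toNat
    have hlead_cons : leadCnt (some c) (c :: rest) = 1 + leadCnt (some c) rest := by
      simp [leadCnt]
    by_cases hp : some c = prev
    · -- continuing the run
      have hlead : leadCnt prev (c :: rest) = 1 + leadCnt prev rest := by
        rw [← hp]; simp [leadCnt]
      have hleadr : leadCnt (some c) rest = leadCnt prev rest := by rw [hp]
      simp only [hccRun, if_pos hp]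
      split_ifs with hstop
      · constructor
        · intro _
          left; exact ⟨1, le_refl 1, by rw [hlead]; push_cast; omega, by push_cast; omega⟩
        · intro _; rfl
      · rw [ih (run + 1) (some c) (by omega)]
        constructor
        · rintro (⟨j, hj1, hj2, hj3⟩ | hw)
          · left
            exact ⟨j + 1, by omega, by rw [hlead, ← hleadr]; push_cast at hj2 ⊢; omega,
                   by push_cast at hj3 ⊢; omega⟩
          · right; exact hwin.mpr (Or.inr hw)
        · rintro (⟨j, hj1, hj2, hj3⟩ | hw)
          · left
            refine ⟨j - 1, ?_, ?_, ?_⟩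
            · -- j ≥ 2 since j = 1 would give n ≤ run + 1 contradicting hstop
              have : ¬ (n ≤ run + 1) := hstop
              omega
            · rw [hlead, ← hleadr] at hj2; push_cast at hj2 ⊢; omega
            · push_cast at hj3 ⊢
              have : ¬ (n ≤ run + 1) := hstop
              omega
          · rcases hwin.mp hw with hfirst | hw'
            · -- the first n.toNat chars are all c: j := n.toNat in the run branch
              rw [htake, hlead_cons] at hfirst
              left
              refine ⟨n.toNat - 1, by omega, ?_, by omega⟩
              omega
            · right; exact hw'
    · -- run resets to 1
      have hlead : leadCnt prev (c :: rest) = 0 := by simp [leadCnt, hp]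
      simp only [hccRun, if_neg hp]
      split_ifs with hstop
      · -- n ≤ 1, so n.toNat = 1 and the first window works
        constructor
        · intro _
          right
          exact hwin.mpr (Or.inl (by rw [htake, hlead_cons]; omega))
        · intro _; rfl
      · rw [ih 1 (some c) (by omega)]
        constructor
        · rintro (⟨j, hj1, hj2, hj3⟩ | hw)
          · right
            apply hwin.mpr; left
            rw [htake, hlead_cons]
            omega
          · right; exact hwin.mpr (Or.inr hw)
        · rintro (⟨j, hj1, hj2, hj3⟩ | hw)
          · exfalso; rw [hlead] at hj2; push_cast at hj2; omega
          · rcases hwin.mp hw with hfirst | hw'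
            · rw [htake, hlead_cons] at hfirst
              left
              refine ⟨n.toNat - 1, by omega, by omega, by omega⟩
            · right; exact hw'

lemma B_iff (s : String) (n : Int) (hn : 1 ≤ n) :
    has_consecutive_chars_alt s n = true ↔ hasWin n.toNat s.toList := by
  unfold has_consecutive_chars_alt
  rw [hccRun_iff n hn s.toList 0 none (le_refl 0)]
  constructor
  · rintro (⟨j, hj1, hj2, hj3⟩ | hw)
    · exfalso
      have h0 : leadCnt none s.toList = 0 := by cases s.toList <;> simp [leadCnt]
      rw [h0] at hj2
      push_cast at hj2; omega
    · exact hw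
  · intro hw; right; exact hw

-- ===== VERDICT (by name: the statement is the Claim_ definition above) =====
theorem has_consecutive_chars_spec : Claim_equal_has_consecutive_chars := by
  intro s n _ hpre
  unfold Spec_has_consecutive_chars
  have hA := A_iff s n hpre
  have hB := B_iff s n hpre
  cases hb : has_consecutive_chars_alt s n with
  | true => exact hA.mpr (hB.mp hb)
  | false =>
    cases ha : has_consecutive_chars s n with
    | false => rfl
    | true => rw [hb] at hB; exact absurd (hB.mpr (hA.mp ha)) (by simp)
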